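-- pv_equiv track=rewrite | github.com/marquimRcc/deepcool-ak620-digital-linux-regataos-opensuse | src/protocol.py | build_packet
-- ===== SOURCE A (Python) =====
-- from typing import Literal
--
-- MODE_CELSIUS: int = 19
--
-- MODE_FAHRENHEIT: int = 35
--
-- MODE_PERCENT: int = 76
--
-- MODE_INIT: int = 170
--
-- DisplayMode = Literal["temp_c", "temp_f", "util", "start"]
--
-- def get_bar_value(input_value: int) -> int:
--     """
--     Calcula valor da barra do topo (0-10).
--
--     Args:
--         input_value: Valor de entrada (0-100)
--
--     Returns:
--         Valor da barra (0-10)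
--
--     Example:
--         >>> get_bar_value(0)
--         0
--         >>> get_bar_value(15)
--         2
--         >>> get_bar_value(100)
--         10
--     """
--     if input_value <= 0:
--         return 0
--     return min((input_value - 1) // 10 + 1, 10)
--
-- def build_packet(value: int = 0, mode: DisplayMode = "util", alarm: bool = False) -> list[int]:
--     """
--     Constrói pacote HID de 64 bytes.
--
--     Args:
--         value: Valor numérico para exibir (0-999)
--         mode: Modo de exibição ("temp_c", "temp_f", "util" ou "start")
--         alarm: True para piscar o display
--
--     Returns:
--         Pacote de 64 bytes como lista de inteiros
--
--     Example:
--         >>> packet = build_packet(25, "temp_c", False)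
--         >>> len(packet)
--         64
--         >>> packet[0]
--         16
--     """
--     data: list[int] = [16] + [0] * 63
--
--     # Modo
--     mode_map: dict[DisplayMode, int] = {
--         "temp_c": MODE_CELSIUS,
--         "temp_f": MODE_FAHRENHEIT,
--         "util": MODE_PERCENT,
--         "start": MODE_INIT,
--     }
--     data[1] = mode_map.get(mode, MODE_CELSIUS)
--
--     # Init não precisa de mais nada
--     if mode == "start":
--         return data
--
--     # Limitar valor entre 0 e 999
--     clamped_value: int = max(0, min(999, value))
--
--     # Barra
--     data[2] = get_bar_value(clamped_value)
--
--     # Dígitos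
--     numbers: list[int] = [int(c) for c in str(clamped_value)]
--     if len(numbers) == 1:
--         data[5] = numbers[0]
--     elif len(numbers) == 2:
--         data[4] = numbers[0]
--         data[5] = numbers[1]
--     elif len(numbers) == 3:
--         data[3] = numbers[0]
--         data[4] = numbers[1]
--         data[5] = numbers[2]
--
--     # Alarme
--     if alarm:
--         data[6] = 1
--
--     return data
-- ===== SOURCE B (Python) =====
-- MODE_CELSIUS = 19
-- MODE_FAHRENHEIT = 35
-- MODE_PERCENT = 76
-- MODE_INIT = 170
--
-- def build_packet(value=0, mode="util", alarm=False):
--     mode_map = {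
--         "temp_c": MODE_CELSIUS,
--         "temp_f": MODE_FAHRENHEIT,
--         "util": MODE_PERCENT,
--         "start": MODE_INIT,
--     }
--     # sparse map: position -> non-zero byte; the packet is materialized at the end
--     sparse = {0: 16, 1: mode_map.get(mode, MODE_CELSIUS)}
--     if mode != "start":
--         v = max(0, min(999, value))
--         sparse[2] = 0 if v <= 0 else min((v - 1) // 10 + 1, 10)
--         for pos, div in ((3, 100), (4, 10), (5, 1)):
--             sparse[pos] = v // div % 10
--         if alarm:
--             sparse[6] = 1
--     return [sparse.get(i, 0) for i in range(64)]
-- ===== Notes on version B (the rewrite author's own statement) =====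
-- stated objective: alternative
-- what changed: B represents the packet as a sparse position->byte dictionary (digits filled by one loop over (position, divisor) pairs using modular arithmetic instead of str() with a 3-way length branch) and materializes the 64 bytes in a single comprehension over range(64), instead of A's index assignments into a mutated 64-zero buffer.
import Mathlib
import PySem

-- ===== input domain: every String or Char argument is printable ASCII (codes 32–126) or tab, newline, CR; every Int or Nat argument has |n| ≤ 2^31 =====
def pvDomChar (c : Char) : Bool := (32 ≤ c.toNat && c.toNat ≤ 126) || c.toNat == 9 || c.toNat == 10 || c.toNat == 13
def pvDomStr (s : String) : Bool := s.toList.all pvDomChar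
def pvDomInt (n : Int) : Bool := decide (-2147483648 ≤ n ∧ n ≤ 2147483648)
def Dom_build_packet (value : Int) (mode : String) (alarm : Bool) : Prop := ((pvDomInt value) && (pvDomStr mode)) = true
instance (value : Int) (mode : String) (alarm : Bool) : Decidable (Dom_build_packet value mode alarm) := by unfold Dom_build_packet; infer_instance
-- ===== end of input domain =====

-- B builds the packet as a sparse position->byte dictionary (digits via one loop of
-- divisor arithmetic, no str() and no length branch) materialized by one pass over
-- range(64), instead of A's index assignments into a mutated 64-zero buffer
-- (objective: alternative representation, same cost).

-- ===== PORT A =====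
def get_bar_value (input_value : Int) : Int :=
  if input_value ≤ 0 then 0
  else min (PySem.Int.floordiv (input_value - 1) 10 + 1) 10

def build_packet (value : Int) (mode : String) (alarm : Bool) : List Int :=
  let data : List Int := ([16] ++ List.replicate 63 0 : List Int)
  let mode_map : PySem.Dict String Int :=
    PySem.Dict.ofList [("temp_c", 19), ("temp_f", 35), ("util", 76), ("start", 170)]
  let data := data.set 1 (mode_map.getD mode 19)
  if mode == "start" then data
  else
    let clamped : Int := max 0 (min 999 value)
    let data := data.set 2 (get_bar_value clamped)
    -- int(c) on a digit char of str(clamped): exact as code point - 48 since clamped ≥ 0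
    let numbers : List Int := (PySem.Int.toChars clamped).map (fun c => ((c.toNat : Int) - 48))
    let data :=
      if numbers.length == 1 then data.set 5 (PySem.List.pyGetD numbers 0 0)
      else if numbers.length == 2 then
        (data.set 4 (PySem.List.pyGetD numbers 0 0)).set 5 (PySem.List.pyGetD numbers 1 0)
      else if numbers.length == 3 then
        ((data.set 3 (PySem.List.pyGetD numbers 0 0)).set 4
          (PySem.List.pyGetD numbers 1 0)).set 5 (PySem.List.pyGetD numbers 2 0)
      else data
    let data := if alarm then data.set 6 1 else data
    data

-- ===== PORT B =====
def build_packet_alt (value : Int) (mode : String) (alarm : Bool) : List Int :=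
  let mode_map : PySem.Dict String Int :=
    PySem.Dict.ofList [("temp_c", 19), ("temp_f", 35), ("util", 76), ("start", 170)]
  let sparse : PySem.Dict Int Int :=
    PySem.Dict.ofList [(0, 16), (1, mode_map.getD mode 19)]
  let sparse :=
    if mode == "start" then sparse
    else
      let v : Int := max 0 (min 999 value)
      let sparse := sparse.insert 2
        (if v ≤ 0 then 0 else min (PySem.Int.floordiv (v - 1) 10 + 1) 10)
      let sparse := ([((3:Int),(100:Int)), (4,10), (5,1)]).foldl
        (fun d pd => d.insert pd.1 (PySem.Int.mod (PySem.Int.floordiv v pd.2) 10)) sparse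
      if alarm then sparse.insert 6 1 else sparse
  (PySem.List.pyRange 0 64 1).map (fun i => sparse.getD i 0)

-- ===== PRECONDITION & SPEC =====
def Spec_build_packet (value : Int) (mode : String) (alarm : Bool) (out : List Int) : Prop := out = build_packet_alt value mode alarm
instance (value : Int) (mode : String) (alarm : Bool) (out : List Int) : Decidable (Spec_build_packet value mode alarm out) := by unfold Spec_build_packet; infer_instance

-- ===== CLAIM =====
def Claim_equal_build_packet : Prop := ∀ (value : Int) (mode : String) (alarm : Bool), Dom_build_packet value mode alarm → Spec_build_packet value mode alarm (build_packet value mode alarm)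

-- ===== LEMMAS AND PROOFS =====

-- A's else branch as a function of the already-clamped value and the mode code
def elseA (c : Int) (code : Int) (alarm : Bool) : List Int :=
  let data : List Int := ([16] ++ List.replicate 63 0 : List Int).set 1 code
  let data := data.set 2 (get_bar_value c)
  let numbers : List Int := (PySem.Int.toChars c).map (fun ch => ((ch.toNat : Int) - 48))
  let data :=
    if numbers.length == 1 then data.set 5 (PySem.List.pyGetD numbers 0 0)
    else if numbers.length == 2 then
      (data.set 4 (PySem.List.pyGetD numbers 0 0)).set 5 (PySem.List.pyGetD numbers 1 0)
    else if numbers.length == 3 then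
      ((data.set 3 (PySem.List.pyGetD numbers 0 0)).set 4
        (PySem.List.pyGetD numbers 1 0)).set 5 (PySem.List.pyGetD numbers 2 0)
    else data
  if alarm then data.set 6 1 else data

-- B's else branch as a function of the already-clamped value and the mode code
def elseB (c : Int) (code : Int) (alarm : Bool) : List Int :=
  let sparse : PySem.Dict Int Int := PySem.Dict.ofList [(0, 16), (1, code)]
  let sparse := sparse.insert 2
    (if c ≤ 0 then 0 else min (PySem.Int.floordiv (c - 1) 10 + 1) 10)
  let sparse := ([((3:Int),(100:Int)), (4,10), (5,1)]).foldl
    (fun d pd => d.insert pd.1 (PySem.Int.mod (PySem.Int.floordiv c pd.2) 10)) sparse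
  let sparse := if alarm then sparse.insert 6 1 else sparse
  (PySem.List.pyRange 0 64 1).map (fun i => sparse.getD i 0)

-- elseB with the dictionary and the range pass evaluated away (keys are concrete)
def elseLit (c : Int) (code : Int) (alarm : Bool) : List Int :=
  ([16, code, (if c ≤ 0 then 0 else min (PySem.Int.floordiv (c - 1) 10 + 1) 10 : Int),
    PySem.Int.mod (PySem.Int.floordiv c 100) 10, PySem.Int.mod (PySem.Int.floordiv c 10) 10,
    PySem.Int.mod (PySem.Int.floordiv c 1) 10,
    if alarm then 1 else 0] ++ List.replicate 57 0 : List Int)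

set_option maxHeartbeats 4000000 in
lemma elseB_eq (c code : Int) (alarm : Bool) : elseB c code alarm = elseLit c code alarm := by
  cases alarm <;> rfl

set_option maxRecDepth 100000 in
set_option maxHeartbeats 4000000 in
lemma else_eq_small : ∀ n : Nat, n < 1000 → ∀ alarm : Bool, ∀ code ∈ ([19,35,76,170] : List Int),
    elseA (n : Int) code alarm = elseLit (n : Int) code alarm := by decide

lemma code_mem (mode : String) :
    (PySem.Dict.ofList [("temp_c", (19:Int)), ("temp_f", 35), ("util", 76), ("start", 170)]).getD mode 19
      ∈ ([19,35,76,170] : List Int) := by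
  have h : (PySem.Dict.ofList [("temp_c", (19:Int)), ("temp_f", 35), ("util", 76), ("start", 170)])
      = PySem.Dict.mk [("temp_c", (19:Int)), ("temp_f", 35), ("util", 76), ("start", 170)] := by rfl
  rw [h]
  by_cases h1 : ("temp_c" == mode) = true <;>
  by_cases h2 : ("temp_f" == mode) = true <;>
  by_cases h3 : ("util" == mode) = true <;>
  by_cases h4 : ("start" == mode) = true <;>
  simp [PySem.Dict.getD, PySem.Dict.get?, List.find?, h1, h2, h3, h4]

lemma build_packet_else (value : Int) (mode : String) (alarm : Bool)
    (hm : ¬ (mode == "start") = true) :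
    build_packet value mode alarm =
      elseA (max 0 (min 999 value))
        ((PySem.Dict.ofList [("temp_c", (19:Int)), ("temp_f", 35), ("util", 76), ("start", 170)]).getD mode 19)
        alarm := by
  simp only [build_packet, if_neg hm]
  rfl

lemma build_packet_alt_else (value : Int) (mode : String) (alarm : Bool)
    (hm : ¬ (mode == "start") = true) :
    build_packet_alt value mode alarm =
      elseB (max 0 (min 999 value))
        ((PySem.Dict.ofList [("temp_c", (19:Int)), ("temp_f", 35), ("util", 76), ("start", 170)]).getD mode 19)
        alarm := by
  simp only [build_packet_alt, if_neg hm]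
  rfl

-- ===== VERDICT =====
set_option maxHeartbeats 4000000 in
theorem build_packet_spec : Claim_equal_build_packet := by
  intro value mode alarm _
  unfold Spec_build_packet
  by_cases hm : (mode == "start") = true
  · have he : mode = "start" := by simpa using hm
    subst he
    rfl
  · rw [build_packet_else value mode alarm hm, build_packet_alt_else value mode alarm hm]
    have hn : (max 0 (min 999 value)).toNat < 1000 := by omega
    have hc : ((max 0 (min 999 value)).toNat : Int) = max 0 (min 999 value) := by omega
    rw [elseB_eq]
    have := else_eq_small (max 0 (min 999 value)).toNat hn alarm _ (code_mem mode)
    rw [hc] at this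
    exact this
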